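-- pv_equiv track=rewrite | github.com/theihor/fluffy-engine | py-src/solver.py | make_region_neighbours_map
-- ===== SOURCE A (Python) =====
-- def make_region_neighbours_map(ids_yx):
--     id_to_neighbours_map = {}
--
--     def ensure_set(a):
--         if a == 0:
--             return
--         if a not in id_to_neighbours_map:
--             id_to_neighbours_map[a] = set()
--
--     def link(a, b):
--         if a == 0:
--             return
--         if b == 0:
--             return
--         if a == b:
--             return
--         id_to_neighbours_map[a].add(b)
--         id_to_neighbours_map[b].add(a)
--
--     h = len(ids_yx)
--     w = len(ids_yx[0])
--     for y in range(h):
--         for x in range(w):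
--             ensure_set(ids_yx[y][x])
--             if x > 0: link(ids_yx[y][x-1], ids_yx[y][x])
--             if y > 0: link(ids_yx[y-1][x], ids_yx[y][x])
--
--     return id_to_neighbours_map
-- ===== SOURCE B (Python) =====
-- def make_region_neighbours_map(ids_yx):
--     h = len(ids_yx)
--     w = len(ids_yx[0])
--     cells = [(y, x) for y in range(h) for x in range(w)]
--
--     # phase 1: keys in first-occurrence (row-major) order
--     seen = {}
--     for y, x in cells:
--         v = ids_yx[y][x]
--         if v != 0:
--             seen[v] = True
--     keys = list(seen)
--
--     # phase 2: the grid's edges, in the order A links them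
--     edges = []
--     for y, x in cells:
--         if x > 0:
--             edges.append((ids_yx[y][x - 1], ids_yx[y][x]))
--         if y > 0:
--             edges.append((ids_yx[y - 1][x], ids_yx[y][x]))
--     edges = [(a, b) for (a, b) in edges if a != 0 and b != 0 and a != b]
--
--     # phase 3: bucket the incident endpoints (duplicates kept), dedup at the end
--     inc = {k: [] for k in keys}
--     for a, b in edges:
--         inc[a].append(b)
--         inc[b].append(a)
--     return {k: set(inc[k]) for k in keys}
-- ===== Notes on version B (the rewrite author's own statement) =====
-- stated objective: alternative
-- what changed: A builds the dict in one interleaved scan that mutates neighbour sets cell by cell via ensure_set/link closures; B is three independent phases: collect the nonzero keys in first-occurrence order, materialise the filtered edge list of the grid, then compute each key's neighbour set by a scan of that edge list.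
import Mathlib
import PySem

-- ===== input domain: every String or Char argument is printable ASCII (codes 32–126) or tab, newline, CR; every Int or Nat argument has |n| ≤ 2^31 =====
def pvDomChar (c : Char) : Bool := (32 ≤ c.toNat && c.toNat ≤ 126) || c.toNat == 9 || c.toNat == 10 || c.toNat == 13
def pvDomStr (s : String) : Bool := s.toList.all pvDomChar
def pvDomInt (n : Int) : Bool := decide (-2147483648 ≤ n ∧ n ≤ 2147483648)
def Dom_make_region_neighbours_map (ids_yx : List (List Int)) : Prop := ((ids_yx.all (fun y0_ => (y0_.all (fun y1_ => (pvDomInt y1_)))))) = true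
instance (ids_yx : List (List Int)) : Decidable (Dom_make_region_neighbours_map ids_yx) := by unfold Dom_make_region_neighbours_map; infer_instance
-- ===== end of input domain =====

-- B replaces A's single interleaved mutate-as-you-scan loop by three independent phases
-- (collect keys, materialise the filtered edge list, compute each key's neighbour list by
-- scanning the edges) — objective: alternative decomposition, no speed claim.

-- ===== PORT A =====
def mrnEnsure (d : PySem.Dict Int (List Int)) (a : Int) : PySem.Dict Int (List Int) :=
  if a = 0 then d
  else if d.contains a then d
  else d.insert a []

def mrnLink (d : PySem.Dict Int (List Int)) (a b : Int) : PySem.Dict Int (List Int) :=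
  if a = 0 then d
  else if b = 0 then d
  else if a = b then d
  else (d.modify a [] (fun s => PySem.Set.add s b)).modify b [] (fun s => PySem.Set.add s a)

def make_region_neighbours_map (ids_yx : List (List Int)) : List (Int × List Int) :=
  let h := PySem.List.len ids_yx
  let w := PySem.List.len (PySem.List.pyGetD ids_yx 0 [])
  let d := (PySem.List.pyRange 0 h 1).foldl (fun d y =>
    (PySem.List.pyRange 0 w 1).foldl (fun d x =>
      let d1 := mrnEnsure d (PySem.List.pyGetD (PySem.List.pyGetD ids_yx y []) x 0)
      let d2 := if 0 < x then
          mrnLink d1 (PySem.List.pyGetD (PySem.List.pyGetD ids_yx y []) (x - 1) 0)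
                     (PySem.List.pyGetD (PySem.List.pyGetD ids_yx y []) x 0)
        else d1
      if 0 < y then
          mrnLink d2 (PySem.List.pyGetD (PySem.List.pyGetD ids_yx (y - 1) []) x 0)
                     (PySem.List.pyGetD (PySem.List.pyGetD ids_yx y []) x 0)
        else d2) d) PySem.Dict.empty
  d.items

-- ===== PORT B =====
def mrnCell (ids_yx : List (List Int)) (y x : Int) : Int :=
  PySem.List.pyGetD (PySem.List.pyGetD ids_yx y []) x 0

def mrnEdges0 (ids_yx : List (List Int)) (cells : List (Int × Int)) : List (Int × Int) :=
  cells.foldl (fun es c =>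
    let es1 := if 0 < c.2 then es ++ [(mrnCell ids_yx c.1 (c.2 - 1), mrnCell ids_yx c.1 c.2)] else es
    if 0 < c.1 then es1 ++ [(mrnCell ids_yx (c.1 - 1) c.2, mrnCell ids_yx c.1 c.2)] else es1) []

def make_region_neighbours_map_alt (ids_yx : List (List Int)) : List (Int × List Int) :=
  let h := PySem.List.len ids_yx
  let w := PySem.List.len (PySem.List.pyGetD ids_yx 0 [])
  let cells := (PySem.List.pyRange 0 h 1).flatMap (fun y => (PySem.List.pyRange 0 w 1).map (fun x => (y, x)))
  -- phase 1: seen = {v: True for nonzero v}; keys = list(seen)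
  let seen := cells.foldl (fun d c =>
    let v := mrnCell ids_yx c.1 c.2
    if v ≠ 0 then d.insert v true else d) (PySem.Dict.empty : PySem.Dict Int Bool)
  let keys := seen.keys
  -- phase 2: the edge list, then the filter comprehension
  let edges := (mrnEdges0 ids_yx cells).filter (fun e => decide (e.1 ≠ 0 ∧ e.2 ≠ 0 ∧ e.1 ≠ e.2))
  -- phase 3: inc = {k: [] for k in keys}; two appends per edge; set() at the end
  let inc0 := keys.foldl (fun d k => d.insert k ([] : List Int)) PySem.Dict.empty
  let inc := edges.foldl (fun d e =>
    (d.modify e.1 [] (fun l => l ++ [e.2])).modify e.2 [] (fun l => l ++ [e.1])) inc0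
  keys.map (fun k => (k, PySem.Set.ofList (inc.getD k [])))

-- ===== PRECONDITION & SPEC =====
-- Pre_ excludes exactly the inputs on which the Python A raises IndexError: the empty grid
-- (len(ids_yx[0]) fails) and grids with a row shorter than the first row (ids_yx[y][x] fails).
def Pre_make_region_neighbours_map (ids_yx : List (List Int)) : Prop :=
  ids_yx ≠ [] ∧ ∀ row ∈ ids_yx, (ids_yx.head?.getD []).length ≤ row.length
instance (ids_yx : List (List Int)) : Decidable (Pre_make_region_neighbours_map ids_yx) := by
  unfold Pre_make_region_neighbours_map; infer_instance

def pvWitness_make_region_neighbours_map : List (List Int) := [[1, 2], [0, 1]]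

def Spec_make_region_neighbours_map (ids_yx : List (List Int)) (out : List (Int × List Int)) : Prop := out = make_region_neighbours_map_alt ids_yx
instance (ids_yx : List (List Int)) (out : List (Int × List Int)) : Decidable (Spec_make_region_neighbours_map ids_yx out) := by unfold Spec_make_region_neighbours_map; infer_instance

-- ===== CLAIM (what is proved, stated in full; the proofs are below) =====
def Claim_equal_make_region_neighbours_map : Prop := ∀ (ids_yx : List (List Int)), Dom_make_region_neighbours_map ids_yx → Pre_make_region_neighbours_map ids_yx → Spec_make_region_neighbours_map ids_yx (make_region_neighbours_map ids_yx)

-- ===== LEMMAS AND PROOFS =====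

-- proof-side definitions: keys and dedup-as-you-go neighbour lists
def mrnKeys (ids_yx : List (List Int)) (cells : List (Int × Int)) : List Int :=
  cells.foldl (fun ks c =>
    let v := mrnCell ids_yx c.1 c.2
    if v ≠ 0 ∧ v ∉ ks then ks ++ [v] else ks) []

def mrnNbrs (edges : List (Int × Int)) (k : Int) : List Int :=
  edges.foldl (fun out e =>
    if e.1 = k ∧ e.2 ∉ out then out ++ [e.2]
    else if e.2 = k ∧ e.1 ∉ out then out ++ [e.1]
    else out) []

-- neighbour buckets with duplicates (what B's phase 3 accumulates per key)
def pvRaw (edges : List (Int × Int)) (k : Int) : List Int :=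
  edges.foldl (fun out e =>
    (out ++ (if e.1 = k then [e.2] else [])) ++ (if e.2 = k then [e.1] else [])) []

-- The grid value at a cell (proof-side abbreviation).
def pvCell (ids : List (List Int)) (c : Int × Int) : Int := mrnCell ids c.1 c.2

-- A's per-cell dict transformation.
def pvStepA (ids : List (List Int)) (d : PySem.Dict Int (List Int)) (c : Int × Int) :
    PySem.Dict Int (List Int) :=
  let d1 := mrnEnsure d (mrnCell ids c.1 c.2)
  let d2 := if 0 < c.2 then mrnLink d1 (mrnCell ids c.1 (c.2 - 1)) (mrnCell ids c.1 c.2) else d1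
  if 0 < c.1 then mrnLink d2 (mrnCell ids (c.1 - 1) c.2) (mrnCell ids c.1 c.2) else d2

def pvEdges (ids : List (List Int)) (cells : List (Int × Int)) : List (Int × Int) :=
  (mrnEdges0 ids cells).filter (fun e => decide (e.1 ≠ 0 ∧ e.2 ≠ 0 ∧ e.1 ≠ e.2))

def pvCells (ids : List (List Int)) : List (Int × Int) :=
  (PySem.List.pyRange 0 (PySem.List.len ids) 1).flatMap
    (fun y => (PySem.List.pyRange 0 (PySem.List.len (PySem.List.pyGetD ids 0 [])) 1).map (fun x => (y, x)))

-- p is row-major closed: every cell's left/up neighbour VALUE occurs among the values before it.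
def pvClosed (ids : List (List Int)) (p : List (Int × Int)) : Prop :=
  ∀ q c s, p = q ++ c :: s →
    (0 < c.2 → mrnCell ids c.1 (c.2 - 1) ∈ q.map (pvCell ids)) ∧
    (0 < c.1 → mrnCell ids (c.1 - 1) c.2 ∈ q.map (pvCell ids))

theorem pvSnocSplit {α : Type} (l q s' : List α) (c c' : α) (h : l ++ [c] = q ++ c' :: s') :
    (s' = [] ∧ q = l ∧ c' = c) ∨ ∃ s'', s' = s'' ++ [c] ∧ l = q ++ c' :: s'' := by
  rcases s'.eq_nil_or_concat with rfl | ⟨s'', c'', rfl⟩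
  · left
    have := List.append_inj' h (by simp)
    simp at this
    exact ⟨rfl, this.1.symm, this.2.symm⟩
  · right
    have h2 : l ++ [c] = (q ++ c' :: s'') ++ [c''] := by simp [h]
    have := List.append_inj' h2 (by simp)
    simp at this
    obtain ⟨h3, h4⟩ := this
    exact ⟨s'', by simp [h4], h3⟩

theorem pvClosed_nil (ids : List (List Int)) : pvClosed ids [] := by
  intro q c s h; cases q <;> simp at h

theorem pvClosed_of_snoc (ids : List (List Int)) (p : List (Int × Int)) (c : Int × Int)
    (h : pvClosed ids (p ++ [c])) : pvClosed ids p := by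
  intro q c' s hs
  exact h q c' (s ++ [c]) (by simp [hs])

theorem pvClosed_at_last (ids : List (List Int)) (p : List (Int × Int)) (c : Int × Int)
    (h : pvClosed ids (p ++ [c])) :
    (0 < c.2 → mrnCell ids c.1 (c.2 - 1) ∈ p.map (pvCell ids)) ∧
    (0 < c.1 → mrnCell ids (c.1 - 1) c.2 ∈ p.map (pvCell ids)) :=
  h p c [] rfl

theorem pvClosed_snoc (ids : List (List Int)) (p : List (Int × Int)) (c : Int × Int)
    (hp : pvClosed ids p)
    (hx : 0 < c.2 → mrnCell ids c.1 (c.2 - 1) ∈ p.map (pvCell ids))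
    (hy : 0 < c.1 → mrnCell ids (c.1 - 1) c.2 ∈ p.map (pvCell ids)) :
    pvClosed ids (p ++ [c]) := by
  intro q c' s hs
  rcases pvSnocSplit p q s c c' hs with ⟨rfl, rfl, rfl⟩ | ⟨s'', rfl, hp'⟩
  · exact ⟨hx, hy⟩
  · exact hp q c' s'' hp'

theorem mem_mrnKeys_fold (ids : List (List Int)) (p : List (Int × Int)) :
    ∀ (s : List Int) (k : Int),
    (k ∈ p.foldl (fun ks c =>
      let v := mrnCell ids c.1 c.2
      if v ≠ 0 ∧ v ∉ ks then ks ++ [v] else ks) s) ↔ k ∈ s ∨ (k ≠ 0 ∧ k ∈ p.map (pvCell ids)) := by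
  induction p with
  | nil => intro s k; simp
  | cons c p ih =>
    intro s k
    simp only [List.foldl_cons, ih, List.map_cons, List.mem_cons]
    by_cases h : mrnCell ids c.1 c.2 ≠ 0 ∧ mrnCell ids c.1 c.2 ∉ s
    · simp only [if_pos h, List.mem_append, List.mem_singleton]
      constructor
      · rintro ((hs | rfl) | hr)
        · exact Or.inl hs
        · exact Or.inr ⟨h.1, Or.inl rfl⟩
        · exact Or.inr ⟨hr.1, Or.inr hr.2⟩
      · rintro (hs | ⟨hk, (rfl | hm)⟩)
        · exact Or.inl (Or.inl hs)
        · exact Or.inl (Or.inr rfl)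
        · exact Or.inr ⟨hk, hm⟩
    · simp only [if_neg h]
      constructor
      · rintro (hs | hr)
        · exact Or.inl hs
        · exact Or.inr ⟨hr.1, Or.inr hr.2⟩
      · rintro (hs | ⟨hk, (rfl | hm)⟩)
        · exact Or.inl hs
        · push Not at h
          exact Or.inl (h (by exact hk))
        · exact Or.inr ⟨hk, hm⟩

theorem mem_mrnKeys (ids : List (List Int)) (p : List (Int × Int)) (k : Int) :
    k ∈ mrnKeys ids p ↔ k ≠ 0 ∧ k ∈ p.map (pvCell ids) := by
  rw [mrnKeys, mem_mrnKeys_fold]; simp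

theorem nodup_mrnKeys_fold (ids : List (List Int)) (p : List (Int × Int)) :
    ∀ (s : List Int), s.Nodup →
    (p.foldl (fun ks c =>
      let v := mrnCell ids c.1 c.2
      if v ≠ 0 ∧ v ∉ ks then ks ++ [v] else ks) s).Nodup := by
  induction p with
  | nil => intro s hs; simpa
  | cons c p ih =>
    intro s hs
    simp only [List.foldl_cons]
    by_cases h : mrnCell ids c.1 c.2 ≠ 0 ∧ mrnCell ids c.1 c.2 ∉ s
    · rw [if_pos h]
      exact ih _ (by simp [List.nodup_append, hs]; exact fun a ha hx => h.2 (hx ▸ ha))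
    · rw [if_neg h]; exact ih _ hs

theorem nodup_mrnKeys (ids : List (List Int)) (p : List (Int × Int)) :
    (mrnKeys ids p).Nodup := nodup_mrnKeys_fold ids p [] (by simp)

theorem mrnKeys_snoc (ids : List (List Int)) (p : List (Int × Int)) (c : Int × Int) :
    mrnKeys ids (p ++ [c]) =
      (if mrnCell ids c.1 c.2 ≠ 0 ∧ mrnCell ids c.1 c.2 ∉ mrnKeys ids p
       then mrnKeys ids p ++ [mrnCell ids c.1 c.2] else mrnKeys ids p) := by
  simp [mrnKeys, List.foldl_append]

theorem mrnNbrs_snoc (es : List (Int × Int)) (e : Int × Int) (k : Int) :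
    mrnNbrs (es ++ [e]) k =
      (if e.1 = k ∧ e.2 ∉ mrnNbrs es k then mrnNbrs es k ++ [e.2]
       else if e.2 = k ∧ e.1 ∉ mrnNbrs es k then mrnNbrs es k ++ [e.1]
       else mrnNbrs es k) := by
  simp [mrnNbrs, List.foldl_append]

theorem mrnNbrs_eq_nil (es : List (Int × Int)) (k : Int)
    (h : ∀ e ∈ es, e.1 ≠ k ∧ e.2 ≠ k) : mrnNbrs es k = [] := by
  induction es using List.reverseRecOn with
  | nil => rfl
  | append_singleton es e ih =>
    have he := h e (by simp)
    rw [mrnNbrs_snoc, if_neg (by simp [he.1]), if_neg (by simp [he.2])]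
    exact ih (fun e' he' => h e' (by simp [he']))

theorem mrnEdges0_snoc (ids : List (List Int)) (p : List (Int × Int)) (c : Int × Int) :
    mrnEdges0 ids (p ++ [c]) = mrnEdges0 ids p
      ++ (if 0 < c.2 then [(mrnCell ids c.1 (c.2 - 1), mrnCell ids c.1 c.2)] else [])
      ++ (if 0 < c.1 then [(mrnCell ids (c.1 - 1) c.2, mrnCell ids c.1 c.2)] else []) := by
  simp only [mrnEdges0, List.foldl_append, List.foldl_cons, List.foldl_nil]
  split_ifs <;> simp

theorem pvEdges_snoc (ids : List (List Int)) (p : List (Int × Int)) (c : Int × Int) :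
    pvEdges ids (p ++ [c]) = pvEdges ids p
      ++ ((if 0 < c.2 then [(mrnCell ids c.1 (c.2 - 1), mrnCell ids c.1 c.2)] else []).filter
            (fun e => decide (e.1 ≠ 0 ∧ e.2 ≠ 0 ∧ e.1 ≠ e.2)))
      ++ ((if 0 < c.1 then [(mrnCell ids (c.1 - 1) c.2, mrnCell ids c.1 c.2)] else []).filter
            (fun e => decide (e.1 ≠ 0 ∧ e.2 ≠ 0 ∧ e.1 ≠ e.2))) := by
  simp [pvEdges, mrnEdges0_snoc, List.filter_append]

theorem mrnKeys_mono (ids : List (List Int)) (p : List (Int × Int)) (c : Int × Int) (k : Int)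
    (h : k ∈ mrnKeys ids p) : k ∈ mrnKeys ids (p ++ [c]) := by
  rw [mem_mrnKeys] at h ⊢
  exact ⟨h.1, by simp only [List.map_append, List.mem_append]; exact Or.inl h.2⟩

theorem pvEdges_endpoints (ids : List (List Int)) (p : List (Int × Int)) (hp : pvClosed ids p) :
    ∀ e ∈ pvEdges ids p, e.1 ∈ mrnKeys ids p ∧ e.2 ∈ mrnKeys ids p := by
  induction p using List.reverseRecOn with
  | nil => intro e he; simp [pvEdges, mrnEdges0] at he
  | append_singleton p c ih =>
    intro e he
    rw [pvEdges_snoc] at he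
    have hmemc : pvCell ids c ∈ (p ++ [c]).map (pvCell ids) := by simp
    simp only [List.mem_append] at he
    rcases he with (he | he) | he
    · have := ih (pvClosed_of_snoc ids p c hp) e he
      exact ⟨mrnKeys_mono ids p c _ this.1, mrnKeys_mono ids p c _ this.2⟩
    · by_cases h2 : 0 < c.2
      · rw [if_pos h2] at he
        simp only [List.filter_cons, List.filter_nil] at he
        by_cases hd : ((mrnCell ids c.1 (c.2 - 1) : Int) ≠ 0 ∧ mrnCell ids c.1 c.2 ≠ 0 ∧ mrnCell ids c.1 (c.2 - 1) ≠ mrnCell ids c.1 c.2)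
        · rw [if_pos (by simpa using hd)] at he
          simp only [List.mem_singleton] at he
          subst he
          refine ⟨?_, ?_⟩
          · rw [mem_mrnKeys]
            refine ⟨hd.1, ?_⟩
            have := (pvClosed_at_last ids p c hp).1 h2
            simp only [List.map_append, List.mem_append]
            exact Or.inl this
          · rw [mem_mrnKeys]
            exact ⟨hd.2.1, hmemc⟩
        · rw [if_neg (by simpa using hd)] at he
          simp at he
      · rw [if_neg h2] at he; simp at he
    · by_cases h1 : 0 < c.1
      · rw [if_pos h1] at he
        simp only [List.filter_cons, List.filter_nil] at he
        by_cases hd : ((mrnCell ids (c.1 - 1) c.2 : Int) ≠ 0 ∧ mrnCell ids c.1 c.2 ≠ 0 ∧ mrnCell ids (c.1 - 1) c.2 ≠ mrnCell ids c.1 c.2)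
        · rw [if_pos (by simpa using hd)] at he
          simp only [List.mem_singleton] at he
          subst he
          refine ⟨?_, ?_⟩
          · rw [mem_mrnKeys]
            refine ⟨hd.1, ?_⟩
            have := (pvClosed_at_last ids p c hp).2 h1
            simp only [List.map_append, List.mem_append]
            exact Or.inl this
          · rw [mem_mrnKeys]
            exact ⟨hd.2.1, hmemc⟩
        · rw [if_neg (by simpa using hd)] at he
          simp at he
      · rw [if_neg h1] at he; simp at he

theorem pvLink_step (d : PySem.Dict Int (List Int)) (K : List Int) (es : List (Int × Int))
    (a b : Int) (hk : d.keys = K) (hg : ∀ k, d.getD k [] = mrnNbrs es k)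
    (hmem : a ≠ 0 → b ≠ 0 → a ≠ b → a ∈ K ∧ b ∈ K) :
    (mrnLink d a b).keys = K ∧
    ∀ k, (mrnLink d a b).getD k [] =
      mrnNbrs (es ++ if a ≠ 0 ∧ b ≠ 0 ∧ a ≠ b then [(a, b)] else []) k := by
  by_cases hc : a ≠ 0 ∧ b ≠ 0 ∧ a ≠ b
  · obtain ⟨ha0, hb0, hab⟩ := hc
    obtain ⟨haK, hbK⟩ := hmem ha0 hb0 hab
    have hca : d.contains a = true := by
      rw [PySem.Dict.contains_eq_decide_mem_keys, hk]; simpa using haK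
    have hcb : (d.modify a ([] : List Int) (fun s => PySem.Set.add s b)).contains b = true := by
      rw [PySem.Dict.contains_modify, PySem.Dict.contains_eq_decide_mem_keys, hk]
      simp [hbK]
    have hlink : mrnLink d a b
        = (d.modify a [] (fun s => PySem.Set.add s b)).modify b [] (fun s => PySem.Set.add s a) := by
      rw [mrnLink, if_neg ha0, if_neg hb0, if_neg hab]
    constructor
    · rw [hlink, PySem.Dict.keys_modify, PySem.Dict.keys_insert_of_contains _ _ hcb,
        PySem.Dict.keys_modify, PySem.Dict.keys_insert_of_contains _ _ hca, hk]
    · intro k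
      rw [hlink, if_pos ⟨ha0, hb0, hab⟩, mrnNbrs_snoc,
        PySem.Dict.getD_modify, PySem.Dict.getD_modify]
      simp only [hg, PySem.Set.add_eq_ite]
      by_cases hkb : k = b <;> by_cases hka : k = a
      · exact absurd (hka.symm.trans hkb) hab
      · subst hkb
        simp only [if_neg hka]
        have hne : ¬ (a = k) := fun h => hka h.symm
        by_cases hm : a ∈ mrnNbrs es k <;>
          simp [hm, hne]
      · subst hka
        have hne : ¬ (b = k) := fun h => hkb h.symm
        simp only [if_neg hkb]
        by_cases hm : b ∈ mrnNbrs es k <;>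
          simp [hm, hne, hg]
      · have hne1 : ¬ (a = k) := fun h => hka h.symm
        have hne2 : ¬ (b = k) := fun h => hkb h.symm
        simp [hka, hkb, hne1, hne2, hg, PySem.Dict.getD_modify]
  · have : mrnLink d a b = d := by
      rw [mrnLink]
      by_cases h1 : a = 0
      · rw [if_pos h1]
      · rw [if_neg h1]
        by_cases h2 : b = 0
        · rw [if_pos h2]
        · rw [if_neg h2, if_pos (by tauto)]
    rw [this, if_neg hc]
    exact ⟨hk, by simpa using hg⟩

theorem pvEnsure_step (ids : List (List Int)) (p : List (Int × Int)) (c : Int × Int)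
    (d : PySem.Dict Int (List Int)) (hp : pvClosed ids p)
    (hk : d.keys = mrnKeys ids p) (hg : ∀ k, d.getD k [] = mrnNbrs (pvEdges ids p) k) :
    (mrnEnsure d (mrnCell ids c.1 c.2)).keys = mrnKeys ids (p ++ [c]) ∧
    ∀ k, (mrnEnsure d (mrnCell ids c.1 c.2)).getD k [] = mrnNbrs (pvEdges ids p) k := by
  by_cases h0 : mrnCell ids c.1 c.2 = 0
  · rw [mrnEnsure, if_pos h0, mrnKeys_snoc, if_neg (by simp [h0])]
    exact ⟨hk, hg⟩
  · by_cases hcon : d.contains (mrnCell ids c.1 c.2) = true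
    · have hmemk : mrnCell ids c.1 c.2 ∈ mrnKeys ids p := by
        rw [PySem.Dict.contains_eq_decide_mem_keys, hk] at hcon; simpa using hcon
      rw [mrnEnsure, if_neg h0, if_pos hcon, mrnKeys_snoc, if_neg (by simp [hmemk])]
      exact ⟨hk, hg⟩
    · have hcon' : d.contains (mrnCell ids c.1 c.2) = false := by
        simpa using hcon
      have hnotk : mrnCell ids c.1 c.2 ∉ mrnKeys ids p := by
        rw [PySem.Dict.contains_eq_decide_mem_keys, hk] at hcon'; simpa using hcon'
      rw [mrnEnsure, if_neg h0, if_neg (by simp [hcon'])]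
      constructor
      · rw [PySem.Dict.keys_insert_of_not_contains _ _ hcon', hk, mrnKeys_snoc,
          if_pos ⟨h0, hnotk⟩]
      · intro k
        rw [PySem.Dict.getD_insert]
        by_cases hkv : k = mrnCell ids c.1 c.2
        · subst hkv
          rw [if_pos rfl]
          refine (mrnNbrs_eq_nil _ _ ?_).symm
          intro e he
          have := pvEdges_endpoints ids p hp e he
          exact ⟨fun hh => hnotk (hh ▸ this.1), fun hh => hnotk (hh ▸ this.2)⟩
        · rw [if_neg hkv]; exact hg k

theorem pvMain (ids : List (List Int)) (p : List (Int × Int)) (hp : pvClosed ids p) :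
    (p.foldl (pvStepA ids) PySem.Dict.empty).keys = mrnKeys ids p ∧
    ∀ k, (p.foldl (pvStepA ids) PySem.Dict.empty).getD k [] = mrnNbrs (pvEdges ids p) k := by
  induction p using List.reverseRecOn with
  | nil =>
    constructor
    · simp [mrnKeys, PySem.Dict.keys]; rfl
    · intro k
      rw [show mrnNbrs (pvEdges ids []) k = [] from rfl]
      simp [PySem.Dict.getD_empty]
  | append_singleton p c ih =>
    obtain ⟨hk, hg⟩ := ih (pvClosed_of_snoc ids p c hp)
    rw [List.foldl_append, List.foldl_cons, List.foldl_nil]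
    set d := p.foldl (pvStepA ids) PySem.Dict.empty with hd
    obtain ⟨hcx, hcy⟩ := pvClosed_at_last ids p c hp
    -- ensure
    obtain ⟨hk1, hg1⟩ := pvEnsure_step ids p c d (pvClosed_of_snoc ids p c hp) hk hg
    set d1 := mrnEnsure d (mrnCell ids c.1 c.2) with hd1
    have hvmem : mrnCell ids c.1 c.2 ≠ 0 → mrnCell ids c.1 c.2 ∈ mrnKeys ids (p ++ [c]) := by
      intro h0
      rw [mem_mrnKeys]
      exact ⟨h0, by simp [pvCell]⟩
    -- left link
    have step2 : (if 0 < c.2 then mrnLink d1 (mrnCell ids c.1 (c.2 - 1)) (mrnCell ids c.1 c.2) else d1).keys = mrnKeys ids (p ++ [c]) ∧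
        ∀ k, (if 0 < c.2 then mrnLink d1 (mrnCell ids c.1 (c.2 - 1)) (mrnCell ids c.1 c.2) else d1).getD k []
          = mrnNbrs (pvEdges ids p ++ ((if 0 < c.2 then [(mrnCell ids c.1 (c.2 - 1), mrnCell ids c.1 c.2)] else []).filter
              (fun e => decide (e.1 ≠ 0 ∧ e.2 ≠ 0 ∧ e.1 ≠ e.2)))) k := by
      by_cases h2 : 0 < c.2
      · simp only [if_pos h2]
        have := pvLink_step d1 (mrnKeys ids (p ++ [c])) (pvEdges ids p)
          (mrnCell ids c.1 (c.2 - 1)) (mrnCell ids c.1 c.2) hk1 hg1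
          (fun ha hb _ => ⟨by
            rw [mem_mrnKeys]
            refine ⟨ha, ?_⟩
            simp only [List.map_append, List.mem_append]
            exact Or.inl (hcx h2), hvmem hb⟩)
        refine ⟨this.1, fun k => ?_⟩
        rw [this.2 k]
        congr 1
        simp only [List.filter_cons, List.filter_nil]
        split_ifs with hf <;> simp_all
      · simp only [if_neg h2, List.filter_nil, List.append_nil]
        exact ⟨hk1, hg1⟩
    set d2 := (if 0 < c.2 then mrnLink d1 (mrnCell ids c.1 (c.2 - 1)) (mrnCell ids c.1 c.2) else d1) with hd2
    obtain ⟨hk2, hg2⟩ := step2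
    set es2 := pvEdges ids p ++ ((if 0 < c.2 then [(mrnCell ids c.1 (c.2 - 1), mrnCell ids c.1 c.2)] else []).filter
        (fun e => decide (e.1 ≠ 0 ∧ e.2 ≠ 0 ∧ e.1 ≠ e.2))) with hes2
    -- up link
    have step3 : (if 0 < c.1 then mrnLink d2 (mrnCell ids (c.1 - 1) c.2) (mrnCell ids c.1 c.2) else d2).keys = mrnKeys ids (p ++ [c]) ∧
        ∀ k, (if 0 < c.1 then mrnLink d2 (mrnCell ids (c.1 - 1) c.2) (mrnCell ids c.1 c.2) else d2).getD k []
          = mrnNbrs (es2 ++ ((if 0 < c.1 then [(mrnCell ids (c.1 - 1) c.2, mrnCell ids c.1 c.2)] else []).filter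
              (fun e => decide (e.1 ≠ 0 ∧ e.2 ≠ 0 ∧ e.1 ≠ e.2)))) k := by
      by_cases h1 : 0 < c.1
      · simp only [if_pos h1]
        have := pvLink_step d2 (mrnKeys ids (p ++ [c])) es2
          (mrnCell ids (c.1 - 1) c.2) (mrnCell ids c.1 c.2) hk2 hg2
          (fun ha hb _ => ⟨by
            rw [mem_mrnKeys]
            refine ⟨ha, ?_⟩
            simp only [List.map_append, List.mem_append]
            exact Or.inl (hcy h1), hvmem hb⟩)
        refine ⟨this.1, fun k => ?_⟩
        rw [this.2 k]
        congr 1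
        simp only [List.filter_cons, List.filter_nil]
        split_ifs with hf <;> simp_all
      · simp only [if_neg h1, List.filter_nil, List.append_nil]
        exact ⟨hk2, hg2⟩
    refine ⟨by rw [pvStepA]; exact step3.1, fun k => ?_⟩
    rw [pvStepA]
    rw [step3.2 k, pvEdges_snoc, hes2]

theorem pvMemGrid (m : Int) (W : Int) (c : Int × Int) :
    c ∈ (PySem.List.pyRange 0 m 1).flatMap (fun y => (PySem.List.pyRange 0 W 1).map (fun x => (y, x)))
      ↔ (0 ≤ c.1 ∧ c.1 < m ∧ 0 ≤ c.2 ∧ c.2 < W) := by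
  constructor
  · intro h
    simp only [List.mem_flatMap, List.mem_map] at h
    obtain ⟨y, hy, x, hx, rfl⟩ := h
    rw [PySem.List.mem_pyRange_one] at hy hx
    exact ⟨hy.1, hy.2, hx.1, hx.2⟩
  · intro ⟨h1, h2, h3, h4⟩
    simp only [List.mem_flatMap, List.mem_map]
    exact ⟨c.1, by rw [PySem.List.mem_pyRange_one]; exact ⟨h1, h2⟩,
      c.2, by rw [PySem.List.mem_pyRange_one]; exact ⟨h3, h4⟩, rfl⟩

theorem pvClosed_rowPrefix (ids : List (List Int)) (W : Int) (y : Int)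
    (P : List (Int × Int))
    (hPc : pvClosed ids P)
    (hPm : ∀ c : Int × Int, 0 ≤ c.1 → c.1 < y → 0 ≤ c.2 → c.2 < W → c ∈ P) :
    ∀ (j : Nat), (j : Int) ≤ W →
      pvClosed ids (P ++ (PySem.List.pyRange 0 (j : Int) 1).map (fun x => (y, x))) := by
  intro j
  induction j with
  | zero => intro _; simpa [PySem.List.pyRange_one_eq_nil] using hPc
  | succ j ih =>
    intro hj
    have hj' : (j : Int) ≤ W := by push_cast at hj ⊢; omega
    have hcast : ((j + 1 : Nat) : Int) = (j : Int) + 1 := by push_cast; ring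
    have hrange : PySem.List.pyRange 0 ((j : Int) + 1) 1
        = PySem.List.pyRange 0 (j : Int) 1 ++ [(j : Int)] :=
      PySem.List.pyRange_one_succ_right (by exact_mod_cast Nat.zero_le j)
    rw [hcast, hrange]
    rw [List.map_append, List.map_cons, List.map_nil, ← List.append_assoc]
    apply pvClosed_snoc
    · exact ih hj'
    · intro hx
      have hjm : ((y, (j : Int) - 1) : Int × Int) ∈ (PySem.List.pyRange 0 (j : Int) 1).map (fun x => (y, x)) := by
        simp only [List.mem_map]
        exact ⟨(j : Int) - 1, by rw [PySem.List.mem_pyRange_one]; omega, rfl⟩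
      have : ((y, (j : Int) - 1) : Int × Int) ∈ P ++ (PySem.List.pyRange 0 (j : Int) 1).map (fun x => (y, x)) := by
        simp only [List.mem_append]; exact Or.inr hjm
      exact List.mem_map_of_mem this
    · intro hy
      have hmem : ((y - 1, (j : Int)) : Int × Int) ∈ P := by
        apply hPm <;> simp <;> omega
      have : ((y - 1, (j : Int)) : Int × Int) ∈ P ++ (PySem.List.pyRange 0 (j : Int) 1).map (fun x => (y, x)) := by
        simp only [List.mem_append]; exact Or.inl hmem
      exact List.mem_map_of_mem this

theorem pvClosed_grid (ids : List (List Int)) (W : Int) (hW : 0 ≤ W) :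
    ∀ (m : Nat),
      pvClosed ids ((PySem.List.pyRange 0 (m : Int) 1).flatMap
        (fun y => (PySem.List.pyRange 0 W 1).map (fun x => (y, x)))) := by
  intro m
  induction m with
  | zero => simpa [PySem.List.pyRange_one_eq_nil] using pvClosed_nil ids
  | succ m ih =>
    have hcast : ((m + 1 : Nat) : Int) = (m : Int) + 1 := by push_cast; ring
    have hrange : PySem.List.pyRange 0 ((m : Int) + 1) 1
        = PySem.List.pyRange 0 (m : Int) 1 ++ [(m : Int)] :=
      PySem.List.pyRange_one_succ_right (by exact_mod_cast Nat.zero_le m)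
    rw [hcast, hrange]
    rw [List.flatMap_append]
    simp only [List.flatMap_cons, List.flatMap_nil, List.append_nil]
    have hPm : ∀ c : Int × Int, 0 ≤ c.1 → c.1 < (m : Int) → 0 ≤ c.2 → c.2 < W →
        c ∈ (PySem.List.pyRange 0 (m : Int) 1).flatMap
          (fun y => (PySem.List.pyRange 0 W 1).map (fun x => (y, x))) := by
      intro c h1 h2 h3 h4
      rw [pvMemGrid]
      exact ⟨h1, h2, h3, h4⟩
    have hres := pvClosed_rowPrefix ids W (m : Int) _ ih hPm W.toNat
      (by rw [Int.toNat_of_nonneg hW])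
    rw [Int.toNat_of_nonneg hW] at hres
    exact hres

theorem pvCells_closed (ids : List (List Int)) : pvClosed ids (pvCells ids) := by
  rw [pvCells]
  have h1 : PySem.List.len ids = ((ids.length : Nat) : Int) := by simp
  have h2 : (0 : Int) ≤ PySem.List.len (PySem.List.pyGetD ids 0 []) := by simp
  rw [h1]
  exact pvClosed_grid ids _ h2 ids.length

theorem A_eq_fold (ids : List (List Int)) :
    make_region_neighbours_map ids = ((pvCells ids).foldl (pvStepA ids) PySem.Dict.empty).items := by
  rw [make_region_neighbours_map, pvCells]
  simp only [List.foldl_flatMap, List.foldl_map]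
  rfl

theorem pvSeen_keys (ids : List (List Int)) (cells : List (Int × Int)) :
    ∀ (d : PySem.Dict Int Bool),
    (cells.foldl (fun d c =>
        let v := mrnCell ids c.1 c.2
        if v ≠ 0 then d.insert v true else d) d).keys
      = cells.foldl (fun ks c =>
        let v := mrnCell ids c.1 c.2
        if v ≠ 0 ∧ v ∉ ks then ks ++ [v] else ks) d.keys := by
  induction cells with
  | nil => intro d; rfl
  | cons c cs ih =>
    intro d
    simp only [List.foldl_cons]
    by_cases h0 : mrnCell ids c.1 c.2 ≠ 0
    · by_cases hm : mrnCell ids c.1 c.2 ∈ d.keys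
      · have hcon : d.contains (mrnCell ids c.1 c.2) = true := by
          rw [PySem.Dict.contains_eq_decide_mem_keys]; simpa using hm
        rw [if_pos h0, ih, PySem.Dict.keys_insert_of_contains _ _ hcon,
          if_neg (by simp [hm])]
      · have hcon : d.contains (mrnCell ids c.1 c.2) = false := by
          rw [PySem.Dict.contains_eq_decide_mem_keys]; simpa using hm
        rw [if_pos h0, ih, PySem.Dict.keys_insert_of_not_contains _ _ hcon,
          if_pos ⟨h0, hm⟩]
    · rw [if_neg h0, ih, if_neg (by simp at h0 ⊢; simp [h0])]

theorem pvInc0_getD (ks : List Int) :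
    ∀ (d : PySem.Dict Int (List Int)), (∀ k, d.getD k [] = []) →
    ∀ k, (ks.foldl (fun d k => d.insert k ([] : List Int)) d).getD k [] = [] := by
  induction ks with
  | nil => intro d hd k; exact hd k
  | cons a ks ih =>
    intro d hd k
    simp only [List.foldl_cons]
    refine ih _ (fun k' => ?_) k
    rw [PySem.Dict.getD_insert]
    split_ifs
    · rfl
    · exact hd k'

theorem pvRaw_snoc (es : List (Int × Int)) (e : Int × Int) (k : Int) :
    pvRaw (es ++ [e]) k
      = (pvRaw es k ++ (if e.1 = k then [e.2] else [])) ++ (if e.2 = k then [e.1] else []) := by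
  simp [pvRaw, List.foldl_append]

theorem pvInc_getD (es : List (Int × Int)) :
    ∀ (es0 : List (Int × Int)) (d : PySem.Dict Int (List Int)),
    (∀ k, d.getD k [] = pvRaw es0 k) →
    ∀ k, (es.foldl (fun d e =>
        (d.modify e.1 [] (fun l => l ++ [e.2])).modify e.2 [] (fun l => l ++ [e.1])) d).getD k []
      = pvRaw (es0 ++ es) k := by
  induction es with
  | nil => intro es0 d hd k; simpa using hd k
  | cons e es ih =>
    intro es0 d hd k
    simp only [List.foldl_cons]
    have hstep : ∀ k', ((d.modify e.1 [] (fun l => l ++ [e.2])).modify e.2 []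
        (fun l => l ++ [e.1])).getD k' [] = pvRaw (es0 ++ [e]) k' := by
      intro k'
      rw [PySem.Dict.getD_modify, PySem.Dict.getD_modify, PySem.Dict.getD_modify, pvRaw_snoc]
      by_cases h2 : k' = e.2 <;> by_cases h1 : k' = e.1
      · subst h2
        simp [h1, hd]
      · subst h2
        simp [h1, hd, Ne.symm h1]
      · subst h1
        simp [h2, hd, Ne.symm h2]
      · simp [h1, h2, hd, Ne.symm h1, Ne.symm h2]
    have := ih (es0 ++ [e]) _ hstep k
    rw [this]
    simp
  
theorem pvOfList_raw (es : List (Int × Int)) (k : Int) :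
    PySem.Set.ofList (pvRaw es k) = mrnNbrs es k := by
  induction es using List.reverseRecOn with
  | nil => rfl
  | append_singleton es e ih =>
    rw [pvRaw_snoc, mrnNbrs_snoc]
    by_cases h1 : e.1 = k <;> by_cases h2 : e.2 = k
    · -- e.1 = k and e.2 = k
      subst h2
      rw [if_pos h1, if_pos rfl, List.append_assoc,
        show ([e.2] ++ [e.1] : List Int) = [e.2, e.1] from rfl,
        show pvRaw es e.2 ++ [e.2, e.1] = (pvRaw es e.2 ++ [e.2]) ++ [e.1] by simp,
        PySem.Set.ofList_append_singleton, PySem.Set.ofList_append_singleton, ih, h1]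
      have hmem : e.2 ∈ PySem.Set.add (mrnNbrs es e.2) e.2 := by
        rw [PySem.Set.mem_add]; exact Or.inr rfl
      rw [PySem.Set.add_of_mem hmem, PySem.Set.add_eq_ite]
      by_cases hm : e.2 ∈ mrnNbrs es e.2
      · rw [if_pos hm, if_neg (by simp [hm]), if_neg (by simp [hm])]
      · rw [if_neg hm, if_pos ⟨rfl, hm⟩]
    · rw [if_pos h1, if_neg h2, List.append_nil, PySem.Set.ofList_append_singleton, ih,
        PySem.Set.add_eq_ite]
      by_cases hm : e.2 ∈ mrnNbrs es k
      · rw [if_pos hm, if_neg (by simp [hm, h1]), if_neg (by simp [h2])]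
      · rw [if_neg hm, if_pos ⟨h1, hm⟩]
    · rw [if_neg h1, if_pos h2, List.append_nil, PySem.Set.ofList_append_singleton, ih,
        PySem.Set.add_eq_ite]
      by_cases hm : e.1 ∈ mrnNbrs es k
      · rw [if_pos hm, if_neg (by simp [h1]), if_neg (by simp [hm, h2])]
      · rw [if_neg hm, if_neg (by simp [h1]), if_pos ⟨h2, hm⟩]
    · rw [if_neg h1, if_neg h2, List.append_nil, List.append_nil, ih,
        if_neg (by simp [h1]), if_neg (by simp [h2])]

-- ===== VERDICT (by name: the statement is the Claim_ definition above) =====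
theorem make_region_neighbours_map_spec : Claim_equal_make_region_neighbours_map := by
  intro ids _ _
  unfold Spec_make_region_neighbours_map
  obtain ⟨hkeys, hget⟩ := pvMain ids (pvCells ids) (pvCells_closed ids)
  have hnd : ((pvCells ids).foldl (pvStepA ids) PySem.Dict.empty).keys.Nodup := by
    rw [hkeys]; exact nodup_mrnKeys ids (pvCells ids)
  rw [A_eq_fold ids, PySem.Dict.items_eq_map_keys _ hnd ([] : List Int), hkeys]
  show _ = make_region_neighbours_map_alt ids
  unfold make_region_neighbours_map_alt
  simp only []
  rw [show ((PySem.List.pyRange 0 (PySem.List.len ids) 1).flatMap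
      (fun y => (PySem.List.pyRange 0 (PySem.List.len (PySem.List.pyGetD ids 0 [])) 1).map (fun x => (y, x)))) = pvCells ids from rfl]
  rw [pvSeen_keys ids (pvCells ids) PySem.Dict.empty]
  rw [show (PySem.Dict.empty : PySem.Dict Int Bool).keys = ([] : List Int) from rfl]
  rw [show ((pvCells ids).foldl (fun ks c =>
      let v := mrnCell ids c.1 c.2
      if v ≠ 0 ∧ v ∉ ks then ks ++ [v] else ks) ([] : List Int)) = mrnKeys ids (pvCells ids) from rfl]
  apply List.map_congr_left
  intro k _
  have hinc0 : ∀ k', ((mrnKeys ids (pvCells ids)).foldl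
      (fun d k => d.insert k ([] : List Int)) PySem.Dict.empty).getD k' [] = [] :=
    pvInc0_getD _ PySem.Dict.empty (fun k' => by rw [PySem.Dict.getD_empty]) 
  have hinc := pvInc_getD (pvEdges ids (pvCells ids)) [] _ (fun k' => hinc0 k') k
  rw [show ((mrnEdges0 ids (pvCells ids)).filter
      (fun e => decide (e.1 ≠ 0 ∧ e.2 ≠ 0 ∧ e.1 ≠ e.2))) = pvEdges ids (pvCells ids) from rfl]
  rw [hinc]
  simp only [List.nil_append]
  rw [pvOfList_raw, hget k]
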